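-- pv_equiv track=rewrite | github.com/theanimation-96/bbox-text-merging | text-merger.py | findNearerBox
-- ===== SOURCE A (Python) =====
-- import math
--
-- TOLERANCE = 50
--
-- def findNearerBox(listOfCenterCords):
--     """
--     The function will loop through the center cords for twice and it will find the matching coordinates with each
--     other with a tolerance of 10-pixels and put it in a key-value manner in the dictionary.
--     then it will again loop through the dictionary values and will find the unique values of the center cords.
--
--     @note - tolerance of 10 px is there due to variation of the text boxes
--     @param listOfCenterCords: list of the center coordinates.
--     @return: unique list of the center coordinates.
--     """
--     dicts = {}
--     unique_center = []
--     for num1 in listOfCenterCords: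
--         for num2 in listOfCenterCords:
--             if math.isclose(num1, num2, abs_tol=TOLERANCE):
--                 dicts[num1] = num2
--
--     for key in dicts:
--         unique_center.append(dicts[key])
--
--     return list(set(unique_center))
-- ===== SOURCE B (Python) =====
-- TOLERANCE = 50
--
-- def _bisect_left(a, x):
--     lo, hi = 0, len(a)
--     while lo < hi:
--         mid = (lo + hi) // 2
--         if a[mid] < x:
--             lo = mid + 1
--         else:
--             hi = mid
--     return lo
--
-- def _bisect_right(a, x):
--     lo, hi = 0, len(a)
--     while lo < hi:
--         mid = (lo + hi) // 2
--         if a[mid] <= x: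
--             lo = mid + 1
--         else:
--             hi = mid
--     return lo
--
-- def findNearerBox(listOfCenterCords):
--     # For each distinct coordinate x (first-occurrence order) the answer is the
--     # LAST element of the list within TOLERANCE of x.  Sweep the list once from
--     # the right; a sorted list of still-unanswered distinct values lets each
--     # element answer its whole tolerance window via binary search, and every
--     # distinct value is answered (and removed) exactly once.
--     distinct = list(dict.fromkeys(listOfCenterCords))
--     q = sorted(distinct)
--     ans = {}
--     for y in reversed(listOfCenterCords):
--         if not q:
--             break
--         lo = _bisect_left(q, y - TOLERANCE)
--         hi = _bisect_right(q, y + TOLERANCE)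
--         if lo < hi:
--             for x in q[lo:hi]:
--                 ans[x] = y
--             q = q[:lo] + q[hi:]
--     return list(set(ans[x] for x in distinct))
-- ===== Notes on version B (the rewrite author's own statement) =====
-- stated objective: faster
-- what changed: Replaces A's O(n^2) all-pairs double loop by one right-to-left sweep that keeps the still-unanswered distinct values in a sorted list and answers each element's whole tolerance window at once via hand-rolled binary search, removing answered values so each distinct value is matched exactly once.
import Mathlib
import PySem

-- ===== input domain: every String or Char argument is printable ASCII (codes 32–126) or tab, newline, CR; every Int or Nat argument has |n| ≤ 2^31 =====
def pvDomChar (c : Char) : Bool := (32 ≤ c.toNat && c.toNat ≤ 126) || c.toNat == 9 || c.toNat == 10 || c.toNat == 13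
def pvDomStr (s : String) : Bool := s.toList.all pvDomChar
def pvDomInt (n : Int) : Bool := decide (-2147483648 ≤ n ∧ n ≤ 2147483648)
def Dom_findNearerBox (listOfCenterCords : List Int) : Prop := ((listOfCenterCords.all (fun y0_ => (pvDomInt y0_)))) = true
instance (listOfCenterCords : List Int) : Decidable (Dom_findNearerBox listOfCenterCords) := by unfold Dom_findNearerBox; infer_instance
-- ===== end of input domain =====

-- B replaces A's quadratic double loop by one right-to-left sweep that answers whole
-- tolerance windows of a sorted unanswered-value list via binary search (objective: faster).
-- A's final `list(set(…))` (Python hash iteration order) is modelled as PySem.Set.ofList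
-- (first occurrences) in both ports, per the set convention.

-- ===== PORT A =====
-- math.isclose(num1, num2, abs_tol=50): on Dom (|n| ≤ 2^31) the rel_tol=1e-9 term is
-- at most ≈2.15 < 50 and the float arithmetic is exact, so it is exactly |num1-num2| ≤ 50.
def findNearerBox (listOfCenterCords : List Int) : List Int :=
  let dicts : PySem.Dict Int Int :=
    listOfCenterCords.foldl (fun d num1 =>
      listOfCenterCords.foldl (fun d num2 =>
        if (num1 - num2).natAbs ≤ 50 then d.insert num1 num2 else d) d)
      PySem.Dict.empty
  -- `for key in dicts: unique_center.append(dicts[key])`; `dicts[key]` never raises (key ∈ dicts)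
  let unique_center : List Int :=
    dicts.keys.foldl (fun acc key => acc ++ [dicts.getD key 0]) []
  PySem.Set.ofList unique_center

-- ===== PORT B =====
-- hand-rolled bisect loop of Source B (`_bisect_left` / `_bisect_right`, shared body, predicate
-- `a[mid] < x` resp. `a[mid] <= x`); a[mid] is always in range, so getD's default is unreachable
def pvBsearch (a : List Int) (p : Int → Bool) (lo hi : Nat) : Nat :=
  if _h : lo < hi then
    let mid := (lo + hi) / 2
    if p (a.getD mid 0) then pvBsearch a p (mid + 1) hi else pvBsearch a p lo mid
  else lo
termination_by hi - lo
decreasing_by all_goals omega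

-- the `for y in reversed(...)` loop of Source B, state = (q, ans)
def pvSweep (rev : List Int) (q : List Int) (ans : PySem.Dict Int Int) : PySem.Dict Int Int :=
  match rev with
  | [] => ans
  | y :: rest =>
    if q = [] then ans   -- break
    else
      let lo := pvBsearch q (fun v => v < y - 50) 0 q.length
      let hi := pvBsearch q (fun v => v ≤ y + 50) 0 q.length
      if lo < hi then
        pvSweep rest
          (PySem.List.slice q none (some (lo : Int)) ++ PySem.List.slice q (some (hi : Int)) none)
          ((PySem.List.slice q (some (lo : Int)) (some (hi : Int))).foldl
            (fun d x => d.insert x y) ans)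
      else pvSweep rest q ans

def findNearerBox_alt (listOfCenterCords : List Int) : List Int :=
  let distinct := PySem.List.dedup listOfCenterCords
  let q := PySem.List.sorted distinct (fun v => v) false
  let ans := pvSweep listOfCenterCords.reverse q PySem.Dict.empty
  -- `ans[x]` never raises (every distinct value is answered); modelled by getD
  PySem.Set.ofList (distinct.map (fun x => ans.getD x 0))

-- ===== PRECONDITION & SPEC =====
def Spec_findNearerBox (listOfCenterCords : List Int) (out : List Int) : Prop := out = findNearerBox_alt listOfCenterCords
instance (listOfCenterCords : List Int) (out : List Int) : Decidable (Spec_findNearerBox listOfCenterCords out) := by unfold Spec_findNearerBox; infer_instance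

-- ===== CLAIM (what is proved, stated in full; the proofs are below) =====
def Claim_equal_findNearerBox : Prop := ∀ (listOfCenterCords : List Int), Dom_findNearerBox listOfCenterCords → Spec_findNearerBox listOfCenterCords (findNearerBox listOfCenterCords)

-- ===== LEMMAS AND PROOFS =====

-- the common value: the LAST element of xs within tolerance 50 of x
def pvLast (xs : List Int) (x : Int) : Int :=
  (xs.reverse.find? (fun y => (x - y).natAbs ≤ 50)).getD 0

-- ---- A side ----

lemma pvFoldl_if_insert (k : Int) (P : Int → Prop) [DecidablePred P] (l : List Int) (d : PySem.Dict Int Int) :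
    l.foldl (fun d y => if P y then d.insert k y else d) d
      = match l.reverse.find? (fun y => decide (P y)) with
        | some v => d.insert k v
        | none => d := by
  induction l using List.reverseRecOn with
  | nil => simp
  | append_singleton l y ih =>
      rw [List.foldl_append]
      simp only [List.foldl_cons, List.foldl_nil, List.reverse_append, List.reverse_cons,
        List.reverse_nil, List.nil_append, List.cons_append, List.find?_cons]
      by_cases hy : P y
      · simp only [hy, if_pos, decide_true]
        rw [ih]
        cases hv : l.reverse.find? (fun y => decide (P y)) with
        | none => simp
        | some v => simp [PySem.Dict.insert_insert_self]
      · simp only [hy, if_neg, not_false_iff, decide_false]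
        rw [ih]

lemma pvA_dict (xs : List Int) :
    xs.foldl (fun d num1 =>
      xs.foldl (fun d num2 =>
        if (num1 - num2).natAbs ≤ 50 then d.insert num1 num2 else d) d)
      PySem.Dict.empty
    = xs.foldl (fun d x => d.insert x (pvLast xs x)) PySem.Dict.empty := by
  apply List.foldl_ext
  intro d x hx
  rw [pvFoldl_if_insert]
  cases hv : xs.reverse.find? (fun y => decide ((x - y).natAbs ≤ 50)) with
  | none =>
      exfalso
      have : ∀ y ∈ xs.reverse, ¬ ((x - y).natAbs ≤ 50) := by
        intro y hy
        have := List.find?_eq_none.mp hv y hy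
        simpa using this
      exact this x (List.mem_reverse.mpr hx) (by simp)
  | some v =>
      simp only [pvLast, hv, Option.getD_some]

lemma pvGetD_foldl_insert_fun (F : Int → Int) (l : List Int) (d : PySem.Dict Int Int) (x : Int) :
    (l.foldl (fun d v => d.insert v (F v)) d).getD x 0
      = if x ∈ l then F x else d.getD x 0 := by
  induction l generalizing d with
  | nil => simp
  | cons v t ih =>
      simp only [List.foldl_cons, ih, List.mem_cons, PySem.Dict.getD_insert]
      by_cases hxt : x ∈ t
      · simp [hxt]
      · by_cases hxv : x = v <;> simp [hxt, hxv]

lemma pvA_eq (xs : List Int) :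
    findNearerBox xs
      = PySem.Set.ofList ((PySem.List.dedup xs).map (fun x => pvLast xs x)) := by
  show PySem.Set.ofList _ = _
  rw [pvA_dict]
  congr 1
  have hkeys : (xs.foldl (fun d x => d.insert x (pvLast xs x)) PySem.Dict.empty).keys
      = PySem.List.dedup xs := by
    rw [PySem.Dict.keys_foldl_insert]
    simp [PySem.Dict.keys_empty, PySem.Set.update_nil_left]
  rw [PySem.List.foldl_append_singleton_eq_map, hkeys]
  apply List.map_congr_left
  intro k hk
  rw [pvGetD_foldl_insert_fun]
  simp [(PySem.List.mem_dedup _ _).mp hk]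

-- ---- B side ----

lemma pvCountP_prefix (q : List Int) (p : Int → Bool) (r : Nat) (hr : r ≤ q.length)
    (h1 : ∀ i (h : i < q.length), i < r → p q[i])
    (h2 : ∀ i (h : i < q.length), r ≤ i → ¬ (p q[i] = true)) :
    q.countP p = r := by
  induction q generalizing r with
  | nil => simp at hr ⊢; omega
  | cons a t ih =>
      cases r with
      | zero =>
          rw [List.countP_eq_zero.mpr]
          intro v hv
          obtain ⟨i, hi, rfl⟩ := List.mem_iff_getElem.mp hv
          exact h2 i hi (by omega)
      | succ r' =>
          have hpa : p a := h1 0 (by simp) (by omega)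
          rw [List.countP_cons_of_pos (p := p) hpa]
          have := ih r' (by simpa using hr)
            (fun i h hlt => by simpa using h1 (i+1) (by simpa using h) (by omega))
            (fun i h hge => by simpa using h2 (i+1) (by simpa using h) (by omega))
          omega

lemma pvBsearch_aux (q : List Int) (p : Int → Bool)
    (hq : q.Pairwise (· ≤ ·)) (hp : ∀ u v : Int, u ≤ v → p v → p u) :
    ∀ (n lo hi : Nat), hi - lo ≤ n → lo ≤ hi → hi ≤ q.length →
      (∀ i (h : i < q.length), i < lo → p q[i]) →
      (∀ i (h : i < q.length), hi ≤ i → ¬ (p q[i] = true)) →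
      pvBsearch q p lo hi = q.countP p := by
  have mono : ∀ i j (hi : i < q.length) (hj : j < q.length), i ≤ j → q[i] ≤ q[j] := by
    intro i j hi hj hij
    rcases Nat.lt_or_ge i j with h | h
    · exact (List.pairwise_iff_getElem.mp hq) i j hi hj h
    · have : i = j := by omega
      subst this; exact le_refl _
  intro n
  induction n with
  | zero =>
      intro lo hi hn hlh hhl h1 h2
      have : lo = hi := by omega
      subst this
      rw [pvBsearch]
      simp only [lt_irrefl, dite_false]
      exact (pvCountP_prefix q p lo hhl h1 (fun i h hge => h2 i h hge)).symm
  | succ n ih =>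
      intro lo hi hn hlh hhl h1 h2
      rw [pvBsearch]
      by_cases h : lo < hi
      · simp only [h, dite_true]
        have hmidlt : (lo + hi) / 2 < q.length := by omega
        have hgd : q.getD ((lo + hi) / 2) 0 = q[(lo + hi) / 2] :=
          List.getD_eq_getElem q 0 hmidlt
        by_cases hmid : p q[(lo + hi) / 2]
        · rw [if_pos (by rw [hgd]; exact hmid)]
          exact ih ((lo + hi) / 2 + 1) hi (by omega) (by omega) hhl
            (fun i hilen hilt => hp _ _ (mono i ((lo+hi)/2) hilen hmidlt (by omega)) hmid)
            h2
        · rw [if_neg (by rw [hgd]; exact hmid)]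
          exact ih lo ((lo + hi) / 2) (by omega) (by omega) (by omega)
            h1
            (fun i hilen hige => fun hpi =>
              hmid (hp _ _ (mono ((lo+hi)/2) i hmidlt hilen hige) hpi))
      · simp only [h, dite_false]
        have : lo = hi := by omega
        subst this
        exact (pvCountP_prefix q p lo hhl h1 (fun i hh hge => h2 i hh hge)).symm

lemma pvBsearch_eq_countP (q : List Int) (p : Int → Bool)
    (hq : q.Pairwise (· ≤ ·)) (hp : ∀ u v : Int, u ≤ v → p v → p u) :
    pvBsearch q p 0 q.length = q.countP p := by
  exact pvBsearch_aux q p hq hp q.length 0 q.length (by omega) (by omega) (by omega)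
    (by omega) (fun i h hi => by omega)

lemma pvTake_countP (q : List Int) (p : Int → Bool)
    (hq : q.Pairwise (· ≤ ·)) (hp : ∀ u v : Int, u ≤ v → p v → p u) :
    q.take (q.countP p) = q.filter p := by
  induction q with
  | nil => simp
  | cons a t ih =>
      have ha : ∀ v ∈ t, a ≤ v := (List.pairwise_cons.mp hq).1
      have ht : t.Pairwise (· ≤ ·) := (List.pairwise_cons.mp hq).2
      by_cases hpa : p a
      · simp [hpa, ih ht]
      · have hall : ∀ v ∈ t, ¬ (p v = true) := fun v hv hpv => hpa (hp a v (ha v hv) hpv)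
        have hc : t.countP p = 0 := List.countP_eq_zero.mpr hall
        have hf : t.filter p = [] := List.filter_eq_nil_iff.mpr hall
        simp [hpa, hc, hf]

lemma pvDrop_countP (q : List Int) (p : Int → Bool)
    (hq : q.Pairwise (· ≤ ·)) (hp : ∀ u v : Int, u ≤ v → p v → p u) :
    q.drop (q.countP p) = q.filter (fun v => !p v) := by
  induction q with
  | nil => simp
  | cons a t ih =>
      have ha : ∀ v ∈ t, a ≤ v := (List.pairwise_cons.mp hq).1
      have ht : t.Pairwise (· ≤ ·) := (List.pairwise_cons.mp hq).2
      by_cases hpa : p a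
      · simp [hpa, ih ht]
      · have hall : ∀ v ∈ t, ¬ (p v = true) := fun v hv hpv => hpa (hp a v (ha v hv) hpv)
        have hc : t.countP p = 0 := List.countP_eq_zero.mpr hall
        have hf : t.filter (fun v => !p v) = t := List.filter_eq_self.mpr (by
          intro v hv; simp [hall v hv])
        simp [hpa, hc, hf]

lemma pvGetD_foldl_insert_const (y : Int) (l : List Int) (d : PySem.Dict Int Int) (x : Int) :
    (l.foldl (fun d v => d.insert v y) d).getD x 0
      = if x ∈ l then y else d.getD x 0 := by
  induction l generalizing d with
  | nil => simp
  | cons v t ih =>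
      simp only [List.foldl_cons, ih, List.mem_cons, PySem.Dict.getD_insert]
      by_cases hxt : x ∈ t
      · simp [hxt]
      · by_cases hxv : x = v <;> simp [hxt, hxv]

lemma pvSweep_not_mem (rev q : List Int) (ans : PySem.Dict Int Int) (x : Int)
    (hx : x ∉ q) : (pvSweep rev q ans).getD x 0 = ans.getD x 0 := by
  induction rev generalizing q ans with
  | nil => rfl
  | cons y rest ih =>
      rw [pvSweep]
      by_cases hq0 : q = []
      · simp [hq0]
      · simp only [hq0, if_false]
        by_cases hlh : pvBsearch q (fun v => v < y - 50) 0 q.length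
            < pvBsearch q (fun v => v ≤ y + 50) 0 q.length
        · rw [if_pos hlh]
          have hxw : x ∉ PySem.List.slice q
              (some (pvBsearch q (fun v => v < y - 50) 0 q.length : Int))
              (some (pvBsearch q (fun v => v ≤ y + 50) 0 q.length : Int)) :=
            fun hm => hx (PySem.List.mem_of_mem_slice _ _ _ hm)
          have hxq' : x ∉ PySem.List.slice q none
                (some (pvBsearch q (fun v => v < y - 50) 0 q.length : Int))
              ++ PySem.List.slice q
                (some (pvBsearch q (fun v => v ≤ y + 50) 0 q.length : Int)) none := by
            intro hm
            rcases List.mem_append.mp hm with hm | hm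
            · exact hx (PySem.List.mem_of_mem_slice _ _ _ hm)
            · exact hx (PySem.List.mem_of_mem_slice _ _ _ hm)
          rw [ih _ _ hxq', pvGetD_foldl_insert_const]
          simp [hxw]
        · rw [if_neg hlh]
          exact ih q ans hx

lemma pvCountP_split (q : List Int) (p1 p2 : Int → Bool) (himp : ∀ v, p1 v → p2 v) :
    q.countP p2 = q.countP p1 + q.countP (fun v => p2 v && !p1 v) := by
  induction q with
  | nil => simp
  | cons a t ih =>
      simp only [List.countP_cons]
      by_cases h1 : p1 a
      · simp [h1, himp a h1, ih]; omega
      · by_cases h2 : p2 a <;> simp [h1, h2, ih] <;> omega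

lemma pvSweep_mem (rev : List Int) (q : List Int) (ans : PySem.Dict Int Int) (x : Int)
    (hq : q.Pairwise (· < ·)) (hx : x ∈ q) :
    (pvSweep rev q ans).getD x 0
      = match rev.find? (fun y => (x - y).natAbs ≤ 50) with
        | some v => v
        | none => ans.getD x 0 := by
  induction rev generalizing q ans with
  | nil => rfl
  | cons y rest ih =>
      have hq0 : q ≠ [] := by rintro rfl; exact (List.not_mem_nil).elim hx
      have hqle : q.Pairwise (· ≤ ·) := hq.imp le_of_lt
      set p1 : Int → Bool := fun v => decide (v < y - 50) with hp1def
      set p2 : Int → Bool := fun v => decide (v ≤ y + 50) with hp2def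
      have hp1 : ∀ u v : Int, u ≤ v → p1 v → p1 u := by
        intro u v huv h; simp only [hp1def, decide_eq_true_eq] at h ⊢; omega
      have hp2 : ∀ u v : Int, u ≤ v → p2 v → p2 u := by
        intro u v huv h; simp only [hp2def, decide_eq_true_eq] at h ⊢; omega
      have himp : ∀ v, p1 v → p2 v := by
        intro v h; simp only [hp1def, hp2def, decide_eq_true_eq] at h ⊢; omega
      have hlo : pvBsearch q p1 0 q.length = q.countP p1 := pvBsearch_eq_countP q p1 hqle hp1
      have hhi : pvBsearch q p2 0 q.length = q.countP p2 := pvBsearch_eq_countP q p2 hqle hp2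
      have hle : q.countP p1 ≤ q.countP p2 := List.countP_mono_left (fun v _ => himp v)
      -- the three slices
      have htake : PySem.List.slice q none (some (q.countP p1 : Int)) = q.filter p1 := by
        rw [PySem.List.slice_to_natCast, pvTake_countP q p1 hqle hp1]
      have hdropq : q.drop (q.countP p1) = q.filter (fun v => !p1 v) :=
        pvDrop_countP q p1 hqle hp1
      have hdrop2 : PySem.List.slice q (some (q.countP p2 : Int)) none
          = q.filter (fun v => !p2 v) := by
        rw [PySem.List.slice_from_natCast, pvDrop_countP q p2 hqle hp2]
      have hq1le : (q.filter (fun v => !p1 v)).Pairwise (· ≤ ·) :=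
        hqle.sublist List.filter_sublist
      have hcnt1 : (q.filter (fun v => !p1 v)).countP p2
          = q.countP (fun v => p2 v && !p1 v) := by
        rw [List.countP_filter]
      have harith : q.countP p2 - q.countP p1 = (q.filter (fun v => !p1 v)).countP p2 := by
        have := pvCountP_split q p1 p2 himp
        rw [hcnt1]
        omega
      have hff : (q.filter (fun v => !p1 v)).filter p2
          = q.filter (fun v => p2 v && !p1 v) := by
        rw [List.filter_filter]
      have hwin : PySem.List.slice q (some (q.countP p1 : Int)) (some (q.countP p2 : Int))
          = q.filter (fun v => p2 v && !p1 v) := by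
        rw [PySem.List.slice_natCast, hdropq, harith, pvTake_countP _ p2 hq1le hp2, hff]
      have hdecomp : q = q.filter p1 ++ q.filter (fun v => p2 v && !p1 v)
          ++ q.filter (fun v => !p2 v) := by
        conv_lhs => rw [← List.take_append_drop (q.countP p1) q]
        rw [pvTake_countP q p1 hqle hp1, List.append_assoc]
        congr 1
        rw [hdropq]
        conv_lhs => rw [← List.take_append_drop ((q.filter (fun v => !p1 v)).countP p2)
          (q.filter (fun v => !p1 v))]
        rw [pvTake_countP _ p2 hq1le hp2, hff, pvDrop_countP _ p2 hq1le hp2]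
        congr 1
        rw [List.filter_filter]
        apply List.filter_congr
        intro v _
        by_cases h2 : p2 v
        · simp [h2]
        · simp only [h2, Bool.not_false, Bool.true_and]
          exact Bool.not_eq_true' _ |>.mpr (Bool.eq_false_iff.mpr (fun h1 => h2 (himp v h1)))
      rw [pvSweep]
      simp only [← hp1def, ← hp2def, hq0, if_false, hlo, hhi, List.find?_cons]
      by_cases hnear : (x - y).natAbs ≤ 50
      · -- x is answered now with value y and removed from q
        have hxw : x ∈ q.filter (fun v => p2 v && !p1 v) :=
          List.mem_filter.mpr ⟨hx, by simp only [hp1def, hp2def]; simp; omega⟩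
        have hlh : q.countP p1 < q.countP p2 := by
          have hpos : 0 < q.countP (fun v => p2 v && !p1 v) :=
            List.countP_pos_iff.mpr ⟨x, hx, (List.mem_filter.mp hxw).2⟩
          have := pvCountP_split q p1 p2 himp
          omega
        rw [if_pos hlh]
        have hxq' : x ∉ q.filter p1 ++ q.filter (fun v => !p2 v) := by
          intro hm
          rcases List.mem_append.mp hm with hm | hm
          · have := (List.mem_filter.mp hm).2
            simp only [hp1def, decide_eq_true_eq] at this; omega
          · have := (List.mem_filter.mp hm).2
            simp only [hp2def] at this; simp at this; omega
        rw [htake, hdrop2, hwin]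
        rw [pvSweep_not_mem _ _ _ _ hxq', pvGetD_foldl_insert_const]
        simp only [hxw, if_pos]
        simp [hnear]
      · -- x stays unanswered; recurse
        have hxnw : x ∉ q.filter (fun v => p2 v && !p1 v) := by
          intro hm
          have := (List.mem_filter.mp hm).2
          simp only [hp1def, hp2def] at this; simp at this; omega
        have hxq' : x ∈ q.filter p1 ++ q.filter (fun v => !p2 v) := by
          have := hdecomp ▸ hx
          rcases List.mem_append.mp this with hm | hm
          · rcases List.mem_append.mp hm with hm | hm
            · exact List.mem_append.mpr (Or.inl hm)
            · exact absurd hm hxnw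
          · exact List.mem_append.mpr (Or.inr hm)
        have hq' : (q.filter p1 ++ q.filter (fun v => !p2 v)).Pairwise (· < ·) := by
          have hsub : List.Sublist (q.filter p1 ++ q.filter (fun v => !p2 v)) q := by
            conv_rhs => rw [hdecomp, List.append_assoc]
            exact List.Sublist.append_left (List.sublist_append_right _ _) _
          exact hq.sublist hsub
        have hfind : (decide ((x - y).natAbs ≤ 50)) = false := by simp [hnear]
        rw [hfind]
        by_cases hlh : q.countP p1 < q.countP p2
        · rw [if_pos hlh, htake, hdrop2, hwin]
          rw [ih _ _ hq' hxq']
          cases rest.find? (fun y => decide ((x - y).natAbs ≤ 50)) with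
          | some v => rfl
          | none =>
              simp only
              rw [pvGetD_foldl_insert_const]
              simp [hxnw]
        · rw [if_neg hlh]
          exact ih q ans hq hx

lemma pvB_eq (xs : List Int) :
    findNearerBox_alt xs
      = PySem.Set.ofList ((PySem.List.dedup xs).map (fun x => pvLast xs x)) := by
  show PySem.Set.ofList _ = _
  congr 1
  apply List.map_congr_left
  intro x hx
  have hq : (PySem.List.sorted (PySem.List.dedup xs) (fun v => v) false).Pairwise (· < ·) := by
    rw [PySem.List.dedup_eq_ofList]
    exact PySem.List.sorted_ofList_pairwise_lt xs
  have hxq : x ∈ PySem.List.sorted (PySem.List.dedup xs) (fun v => v) false :=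
    (PySem.List.sorted_perm _ _ _).mem_iff.mpr hx
  rw [pvSweep_mem xs.reverse _ PySem.Dict.empty x hq hxq]
  cases hv : xs.reverse.find? (fun y => decide ((x - y).natAbs ≤ 50)) with
  | none =>
      exfalso
      have hxs : x ∈ xs := (PySem.List.mem_dedup _ _).mp hx
      have := List.find?_eq_none.mp hv x (List.mem_reverse.mpr hxs)
      simp at this
  | some v => simp only [pvLast, hv, Option.getD_some]

-- ===== VERDICT (by name: the statement is the Claim_ definition above) =====
theorem findNearerBox_spec : Claim_equal_findNearerBox := by
  intro xs _
  show _ = _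
  rw [pvA_eq, pvB_eq]
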